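-- pv_equiv track=rewrite | github.com/xxriny/KNU-PROJECT | backend/pipeline/nodes/sa_phase5.py | _scoped_frameworks_for_module
-- ===== SOURCE A (Python) =====
-- from collections import defaultdict
--
-- BACKEND_FRAMEWORKS = {"fastapi", "flask", "django", "streamlit"}
--
-- FRONTEND_FRAMEWORKS = {"react", "electron", "vite", "next.js", "vue", "angular"}
--
-- def _framework_scope_map(framework_evidence: list[dict]) -> dict[str, set[str]]:
--     scope_map: dict[str, set[str]] = defaultdict(set)
--     for item in framework_evidence or []:
--         framework = (item.get("framework") or "").strip().lower()
--         file_path = (item.get("file") or "").replace("\\", "/").lower()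
--         if not framework or not file_path:
--             continue
--         if "/" in file_path:
--             scope_map[framework].add(file_path.rsplit("/", 1)[0] + "/")
--         else:
--             scope_map[framework].add(file_path)
--     return scope_map
--
-- def _module_family(module_name: str, language: str) -> str:
--     name = (module_name or "").replace("\\", "/").lower()
--     lang = (language or "").lower()
--     if name.startswith("backend/"):
--         return "backend"
--     if name.startswith("electron/"):
--         return "electron"
--     if name.startswith("src/") or any(token in name for token in ["component", "page", "screen", "frontend"]):
--         return "frontend"
--     if lang in {"javascript", "typescript"}:
--         return "frontend"
--     if lang == "python":
--         return "backend"
--     return "unknown"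
--
-- def _path_is_close(module_name: str, scoped_path: str) -> bool:
--     module_path = (module_name or "").replace("\\", "/").lower()
--     scope_path = (scoped_path or "").replace("\\", "/").lower()
--     return bool(scope_path) and (module_path.startswith(scope_path) or scope_path.startswith(module_path.rsplit("/", 1)[0] + "/"))
--
-- def _scoped_frameworks_for_module(module_name: str, language: str, detected_frameworks: list[str], framework_evidence: list[dict]) -> list[str]:
--     family = _module_family(module_name, language)
--     scope_map = _framework_scope_map(framework_evidence)
--     scoped: list[str] = []
--
--     for framework_name in detected_frameworks or []:
--         framework = (framework_name or "").strip().lower()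
--         if not framework:
--             continue
--
--         if family == "backend" and framework not in BACKEND_FRAMEWORKS:
--             continue
--         if family in {"frontend", "electron"} and framework not in FRONTEND_FRAMEWORKS:
--             continue
--
--         scoped_paths = scope_map.get(framework, set())
--         if scoped_paths:
--             if any(_path_is_close(module_name, scoped_path) for scoped_path in scoped_paths if "/" in scoped_path):
--                 scoped.append(framework_name)
--                 continue
--             if family == "backend" and framework in BACKEND_FRAMEWORKS:
--                 scoped.append(framework_name)
--                 continue
--             if family in {"frontend", "electron"} and framework in FRONTEND_FRAMEWORKS:
--                 scoped.append(framework_name)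
--                 continue
--             continue
--
--         scoped.append(framework_name)
--
--     return scoped
-- ===== SOURCE B (Python) =====
-- BACKEND_FRAMEWORKS = {"fastapi", "flask", "django", "streamlit"}
--
-- FRONTEND_FRAMEWORKS = {"react", "electron", "vite", "next.js", "vue", "angular"}
--
-- def _path_is_close(module_name, scoped_path):
--     module_path = (module_name or "").replace("\\", "/").lower()
--     scope_path = (scoped_path or "").replace("\\", "/").lower()
--     return bool(scope_path) and (module_path.startswith(scope_path) or scope_path.startswith(module_path.rsplit("/", 1)[0] + "/"))
--
-- def _scoped_frameworks_for_module(module_name, language, detected_frameworks, framework_evidence):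
--     # Decide the allowed set directly from the raw family rules; for a known
--     # family the whole evidence/scope machinery is irrelevant (every allowed
--     # framework is kept whether or not it has evidence), so it reduces to a
--     # plain membership filter.
--     name = (module_name or "").replace("\\", "/").lower()
--     lang = (language or "").lower()
--     if name.startswith("backend/"):
--         allowed = BACKEND_FRAMEWORKS
--     elif name.startswith("electron/"):
--         allowed = FRONTEND_FRAMEWORKS
--     elif (name.startswith("src/")
--           or any(token in name for token in ("component", "page", "screen", "frontend"))
--           or lang in ("javascript", "typescript")):
--         allowed = FRONTEND_FRAMEWORKS
--     elif lang == "python":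
--         allowed = BACKEND_FRAMEWORKS
--     else:
--         allowed = None
--
--     if allowed is not None:
--         return [f for f in (detected_frameworks or [])
--                 if (f or "").strip().lower() in allowed]
--
--     # Unknown family: no dict-of-sets scope map; a single pass over the raw
--     # evidence records which frameworks have any usable evidence and which
--     # have a directory close to the module.
--     evidenced = set()
--     close = set()
--     for item in (framework_evidence or []):
--         fw = (item.get("framework") or "").strip().lower()
--         fp = (item.get("file") or "").replace("\\", "/").lower()
--         if not fw or not fp:
--             continue
--         evidenced.add(fw)
--         if "/" in fp and _path_is_close(module_name, fp.rsplit("/", 1)[0] + "/"):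
--             close.add(fw)
--
--     return [f for f in (detected_frameworks or [])
--             if (fw := (f or "").strip().lower()) and (fw not in evidenced or fw in close)]
-- ===== Notes on version B (the rewrite author's own statement) =====
-- stated objective: simpler
-- what changed: B never builds the per-framework dict-of-sets scope map: it resolves the family to an allowed set up front and for known families returns a plain membership filter over detected_frameworks (the evidence is provably irrelevant there), while for unknown families one direct pass over the raw evidence collects two flat sets (frameworks with evidence, frameworks with a close directory) that decide the final filter.
import Mathlib
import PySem

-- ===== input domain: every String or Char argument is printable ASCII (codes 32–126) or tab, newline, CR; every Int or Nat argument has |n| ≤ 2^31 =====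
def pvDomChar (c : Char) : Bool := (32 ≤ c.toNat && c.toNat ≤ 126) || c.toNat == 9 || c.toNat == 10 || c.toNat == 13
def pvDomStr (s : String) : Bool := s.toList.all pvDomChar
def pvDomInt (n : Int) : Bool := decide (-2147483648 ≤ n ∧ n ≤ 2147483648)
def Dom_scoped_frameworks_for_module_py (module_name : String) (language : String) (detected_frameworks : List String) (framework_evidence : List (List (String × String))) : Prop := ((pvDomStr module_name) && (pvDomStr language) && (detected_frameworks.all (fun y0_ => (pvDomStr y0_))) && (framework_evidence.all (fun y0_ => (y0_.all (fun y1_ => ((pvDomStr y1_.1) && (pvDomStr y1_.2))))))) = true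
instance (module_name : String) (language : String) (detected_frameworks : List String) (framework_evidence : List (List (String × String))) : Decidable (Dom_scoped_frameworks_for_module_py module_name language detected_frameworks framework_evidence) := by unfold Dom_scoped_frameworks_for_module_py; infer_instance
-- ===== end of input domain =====

-- B drops A's dict-of-sets scope map entirely: a known family reduces to a plain membership
-- filter, and for the unknown family one pass over the raw evidence collects two flat sets
-- (evidenced frameworks, frameworks with a close directory) that decide the filter (objective: simpler).


-- ===== PORT A =====
-- module-level constants shared by Source A and Source B

def pvBackendFrameworks : PySem.Set String := PySem.Set.ofList ["fastapi", "flask", "django", "streamlit"]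

def pvFrontendFrameworks : PySem.Set String := PySem.Set.ofList ["react", "electron", "vite", "next.js", "vue", "angular"]

-- s.rsplit("/", 1)[0] (no PySem primitive for rsplit; exact: whole string when no '/', else prefix before the last '/')
def pvRsplitHeadSlash (s : String) : String :=
  if PySem.Str.isIn "/" s then String.ofList (((s.toList.reverse.dropWhile (· ≠ '/')).drop 1).reverse)
  else s

-- _path_is_close (identical module context in Source A and Source B)
def pvPathIsClose (module_name : String) (scoped_path : String) : Bool :=
  let module_path := PySem.Str.lower (PySem.Str.replace module_name "\\" "/")
  let scope_path := PySem.Str.lower (PySem.Str.replace scoped_path "\\" "/")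
  !(scope_path == "") &&
    (PySem.Str.startswith module_path scope_path ||
     PySem.Str.startswith scope_path (pvRsplitHeadSlash module_path ++ "/"))

-- loop body of A's _framework_scope_map
def pvScopeStep (scope_map : PySem.Dict String (PySem.Set String)) (item : List (String × String)) : PySem.Dict String (PySem.Set String) :=
  let framework := PySem.Str.lower (PySem.Str.strip (((PySem.Dict.ofList item).get? "framework").getD ""))
  let file_path := PySem.Str.lower (PySem.Str.replace (((PySem.Dict.ofList item).get? "file").getD "") "\\" "/")
  if framework == "" || file_path == "" then scope_map
  else if PySem.Str.isIn "/" file_path then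
    scope_map.insert framework (PySem.Set.add (scope_map.getD framework PySem.Set.empty) (pvRsplitHeadSlash file_path ++ "/"))
  else
    scope_map.insert framework (PySem.Set.add (scope_map.getD framework PySem.Set.empty) file_path)

def pvFrameworkScopeMap (framework_evidence : List (List (String × String))) : PySem.Dict String (PySem.Set String) :=
  framework_evidence.foldl pvScopeStep PySem.Dict.empty

def pvModuleFamily (module_name : String) (language : String) : String :=
  let name := PySem.Str.lower (PySem.Str.replace module_name "\\" "/")
  let lang := PySem.Str.lower language
  if PySem.Str.startswith name "backend/" then "backend"
  else if PySem.Str.startswith name "electron/" then "electron"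
  else if PySem.Str.startswith name "src/" ||
          (["component", "page", "screen", "frontend"].any (fun token => PySem.Str.isIn token name)) then "frontend"
  else if lang == "javascript" || lang == "typescript" then "frontend"
  else if lang == "python" then "backend"
  else "unknown"

-- loop body of A's main loop
def pvStepA (family module_name : String) (scope_map : PySem.Dict String (PySem.Set String)) (out_ : List String) (framework_name : String) : List String :=
  let framework := PySem.Str.lower (PySem.Str.strip framework_name)
  if framework == "" then out_
  else if family == "backend" && !(PySem.Set.contains pvBackendFrameworks framework) then out_
  else if (family == "frontend" || family == "electron") && !(PySem.Set.contains pvFrontendFrameworks framework) then out_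
  else
    let scoped_paths := scope_map.getD framework PySem.Set.empty
    if !scoped_paths.isEmpty then
      if (scoped_paths.filter (fun p => PySem.Str.isIn "/" p)).any (fun p => pvPathIsClose module_name p) then
        out_ ++ [framework_name]
      else if family == "backend" && PySem.Set.contains pvBackendFrameworks framework then
        out_ ++ [framework_name]
      else if (family == "frontend" || family == "electron") && PySem.Set.contains pvFrontendFrameworks framework then
        out_ ++ [framework_name]
      else out_
    else out_ ++ [framework_name]

def scoped_frameworks_for_module_py (module_name : String) (language : String) (detected_frameworks : List String) (framework_evidence : List (List (String × String))) : List String :=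
  let family := pvModuleFamily module_name language
  let scope_map := pvFrameworkScopeMap framework_evidence
  detected_frameworks.foldl (pvStepA family module_name scope_map) []

-- ===== PORT B =====
-- the allowed set decided up front from the raw family rules
def pvAllowed (module_name : String) (language : String) : Option (PySem.Set String) :=
  let name := PySem.Str.lower (PySem.Str.replace module_name "\\" "/")
  let lang := PySem.Str.lower language
  if PySem.Str.startswith name "backend/" then some pvBackendFrameworks
  else if PySem.Str.startswith name "electron/" then some pvFrontendFrameworks
  else if PySem.Str.startswith name "src/" ||
          (["component", "page", "screen", "frontend"].any (fun token => PySem.Str.isIn token name)) ||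
          lang == "javascript" || lang == "typescript" then some pvFrontendFrameworks
  else if lang == "python" then some pvBackendFrameworks
  else none

-- loop body of B's single evidence pass (evidenced set, close set)
def pvEvStep (module_name : String) (st : PySem.Set String × PySem.Set String) (item : List (String × String)) : PySem.Set String × PySem.Set String :=
  let fw := PySem.Str.lower (PySem.Str.strip (((PySem.Dict.ofList item).get? "framework").getD ""))
  let fp := PySem.Str.lower (PySem.Str.replace (((PySem.Dict.ofList item).get? "file").getD "") "\\" "/")
  if fw == "" || fp == "" then st
  else
    (PySem.Set.add st.1 fw,
     if PySem.Str.isIn "/" fp && pvPathIsClose module_name (pvRsplitHeadSlash fp ++ "/") then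
       PySem.Set.add st.2 fw
     else st.2)

def pvEvidenceSets (module_name : String) (framework_evidence : List (List (String × String))) : PySem.Set String × PySem.Set String :=
  framework_evidence.foldl (pvEvStep module_name) (PySem.Set.empty, PySem.Set.empty)

def scoped_frameworks_for_module_py_alt (module_name : String) (language : String) (detected_frameworks : List String) (framework_evidence : List (List (String × String))) : List String :=
  match pvAllowed module_name language with
  | some allowed =>
    detected_frameworks.filter (fun f => PySem.Set.contains allowed (PySem.Str.lower (PySem.Str.strip f)))
  | none =>
    let sets := pvEvidenceSets module_name framework_evidence
    detected_frameworks.filter (fun f =>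
      let fw := PySem.Str.lower (PySem.Str.strip f)
      !(fw == "") && (!(PySem.Set.contains sets.1 fw) || PySem.Set.contains sets.2 fw))

-- ===== PRECONDITION & SPEC =====
def Spec_scoped_frameworks_for_module_py (module_name : String) (language : String) (detected_frameworks : List String) (framework_evidence : List (List (String × String))) (out : List String) : Prop := out = scoped_frameworks_for_module_py_alt module_name language detected_frameworks framework_evidence
instance (module_name : String) (language : String) (detected_frameworks : List String) (framework_evidence : List (List (String × String))) (out : List String) : Decidable (Spec_scoped_frameworks_for_module_py module_name language detected_frameworks framework_evidence out) := by unfold Spec_scoped_frameworks_for_module_py; infer_instance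

-- ===== CLAIM (what is proved, stated in full; the proofs are below) =====
def Claim_equal_scoped_frameworks_for_module_py : Prop := ∀ (module_name : String) (language : String) (detected_frameworks : List String) (framework_evidence : List (List (String × String))), Dom_scoped_frameworks_for_module_py module_name language detected_frameworks framework_evidence → Spec_scoped_frameworks_for_module_py module_name language detected_frameworks framework_evidence (scoped_frameworks_for_module_py module_name language detected_frameworks framework_evidence)

-- ===== LEMMAS AND PROOFS =====

-- B's up-front allowed set matches A's family classification
set_option maxHeartbeats 1000000 in
theorem pvAllowed_cases (module_name language : String) :
    (pvModuleFamily module_name language = "backend" ∧ pvAllowed module_name language = some pvBackendFrameworks) ∨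
    ((pvModuleFamily module_name language = "frontend" ∨ pvModuleFamily module_name language = "electron") ∧ pvAllowed module_name language = some pvFrontendFrameworks) ∨
    (pvModuleFamily module_name language = "unknown" ∧ pvAllowed module_name language = none) := by
  unfold pvModuleFamily pvAllowed
  dsimp only []
  split_ifs <;> simp_all

-- sets never contain the empty string
theorem pvBackend_not_empty : PySem.Set.contains pvBackendFrameworks "" = false := by decide
theorem pvFrontend_not_empty : PySem.Set.contains pvFrontendFrameworks "" = false := by decide

-- PySem.Set.add facts specialised to String
theorem pv_isEmpty_add (s : PySem.Set String) (x : String) : (PySem.Set.add s x).isEmpty = false := by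
  unfold PySem.Set.add
  split
  · rename_i h
    cases s with
    | nil => simp [PySem.Set.contains] at h
    | cons a t => simp
  · simp

theorem pv_contains_add_self (s : PySem.Set String) (x : String) : PySem.Set.contains (PySem.Set.add s x) x = true := by
  simp [PySem.Set.contains, PySem.Set.mem_add]

theorem pv_contains_add_of_ne (s : PySem.Set String) (x y : String) (h : y ≠ x) :
    PySem.Set.contains (PySem.Set.add s x) y = PySem.Set.contains s y := by
  simp [PySem.Set.contains, PySem.Set.mem_add, h]

theorem pv_any_add (s : PySem.Set String) (x : String) (p : String → Bool) :
    (PySem.Set.add s x).any p = (s.any p || p x) := by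
  unfold PySem.Set.add
  split
  · rename_i h
    have hx : x ∈ s := by simpa [PySem.Set.contains] using h
    cases hp : p x
    · simp
    · simp only [Bool.or_true, List.any_eq_true]
      exact ⟨x, hx, hp⟩
  · simp

-- a directory prefix always contains '/'
theorem pv_isIn_slash_append (s : String) : PySem.Str.isIn "/" (s ++ "/") = true := by
  rw [PySem.Str.isIn_iff_infix]
  refine List.IsSuffix.isInfix ⟨s.toList, ?_⟩
  simp [String.toList_append]

-- the invariant tying A's scope map to B's two flat sets
def pvInv (module_name : String) (d : PySem.Dict String (PySem.Set String)) (st : PySem.Set String × PySem.Set String) : Prop :=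
  ∀ fw : String,
    (d.getD fw PySem.Set.empty).isEmpty = !(PySem.Set.contains st.1 fw) ∧
    (d.getD fw PySem.Set.empty).any (fun p => PySem.Str.isIn "/" p && pvPathIsClose module_name p) = PySem.Set.contains st.2 fw

theorem pvInv_step (module_name : String) (item : List (String × String))
    (d : PySem.Dict String (PySem.Set String)) (st : PySem.Set String × PySem.Set String)
    (h : pvInv module_name d st) :
    pvInv module_name (pvScopeStep d item) (pvEvStep module_name st item) := by
  unfold pvScopeStep pvEvStep
  set fw0 := PySem.Str.lower (PySem.Str.strip (((PySem.Dict.ofList item).get? "framework").getD "")) with hfw0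
  set fp := PySem.Str.lower (PySem.Str.replace (((PySem.Dict.ofList item).get? "file").getD "") "\\" "/")  with hfp
  by_cases hskip : (fw0 == "" || fp == "") = true
  · rw [if_pos hskip, if_pos hskip]
    exact h
  · rw [if_neg hskip, if_neg hskip]
    intro fw
    cases hslash : PySem.Str.isIn "/" fp <;>
      simp only [Bool.false_and, Bool.true_and, Bool.false_eq_true, if_false, if_true] <;>
      by_cases hk : fw = fw0
    · subst hk
      refine ⟨?_, ?_⟩
      · rw [PySem.Dict.getD_insert_self, pv_isEmpty_add, pv_contains_add_self]
        rfl
      · rw [PySem.Dict.getD_insert_self, pv_any_add, (h fw0).2, hslash]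
        simp
    · refine ⟨?_, ?_⟩
      · rw [PySem.Dict.getD_insert_of_ne d _ PySem.Set.empty hk, (h fw).1,
            pv_contains_add_of_ne _ _ _ hk]
      · rw [PySem.Dict.getD_insert_of_ne d _ PySem.Set.empty hk, (h fw).2]
    · subst hk
      refine ⟨?_, ?_⟩
      · rw [PySem.Dict.getD_insert_self, pv_isEmpty_add, pv_contains_add_self]
        rfl
      · rw [PySem.Dict.getD_insert_self, pv_any_add, (h fw0).2]
        cases hclose : pvPathIsClose module_name (pvRsplitHeadSlash fp ++ "/")
        · rw [pv_isIn_slash_append]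
          simp
        · rw [pv_isIn_slash_append]
          simp
    · refine ⟨?_, ?_⟩
      · rw [PySem.Dict.getD_insert_of_ne d _ PySem.Set.empty hk, (h fw).1,
            pv_contains_add_of_ne _ _ _ hk]
      · rw [PySem.Dict.getD_insert_of_ne d _ PySem.Set.empty hk, (h fw).2]
        split
        · rw [pv_contains_add_of_ne _ _ _ hk]
        · rfl

set_option maxHeartbeats 1000000 in
theorem pvInv_holds (module_name : String) (framework_evidence : List (List (String × String))) :
    pvInv module_name (pvFrameworkScopeMap framework_evidence) (pvEvidenceSets module_name framework_evidence) := by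
  unfold pvFrameworkScopeMap pvEvidenceSets
  suffices H : ∀ (l : List (List (String × String))) (d : PySem.Dict String (PySem.Set String)) (st : PySem.Set String × PySem.Set String),
      pvInv module_name d st → pvInv module_name (l.foldl pvScopeStep d) (l.foldl (pvEvStep module_name) st) by
    refine H framework_evidence PySem.Dict.empty (PySem.Set.empty, PySem.Set.empty) ?_
    intro fw
    constructor <;> simp [PySem.Dict.getD_empty, PySem.Set.empty, PySem.Set.contains]
  intro l
  induction l with
  | nil => intro d st h; exact h
  | cons x xs ih =>
    intro d st h
    simp only [List.foldl_cons]
    exact ih _ _ (pvInv_step module_name x d st h)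

-- per-element reduction of A's step for a known family
set_option maxHeartbeats 1000000 in
theorem pvStepA_backend (module_name : String) (d : PySem.Dict String (PySem.Set String)) (out_ : List String) (f : String) :
    pvStepA "backend" module_name d out_ f =
      if PySem.Set.contains pvBackendFrameworks (PySem.Str.lower (PySem.Str.strip f)) then out_ ++ [f] else out_ := by
  unfold pvStepA
  have hb := pvBackend_not_empty
  cases he : (PySem.Str.lower (PySem.Str.strip f) == "") <;>
    cases hc : PySem.Set.contains pvBackendFrameworks (PySem.Str.lower (PySem.Str.strip f)) <;>
    split_ifs <;> simp_all

set_option maxHeartbeats 1000000 in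
theorem pvStepA_frontend (module_name : String) (d : PySem.Dict String (PySem.Set String)) (out_ : List String) (f : String) :
    pvStepA "frontend" module_name d out_ f =
      if PySem.Set.contains pvFrontendFrameworks (PySem.Str.lower (PySem.Str.strip f)) then out_ ++ [f] else out_ := by
  unfold pvStepA
  have hb := pvFrontend_not_empty
  cases he : (PySem.Str.lower (PySem.Str.strip f) == "") <;>
    cases hc : PySem.Set.contains pvFrontendFrameworks (PySem.Str.lower (PySem.Str.strip f)) <;>
    split_ifs <;> simp_all

set_option maxHeartbeats 1000000 in
theorem pvStepA_electron (module_name : String) (d : PySem.Dict String (PySem.Set String)) (out_ : List String) (f : String) :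
    pvStepA "electron" module_name d out_ f =
      if PySem.Set.contains pvFrontendFrameworks (PySem.Str.lower (PySem.Str.strip f)) then out_ ++ [f] else out_ := by
  unfold pvStepA
  have hb := pvFrontend_not_empty
  cases he : (PySem.Str.lower (PySem.Str.strip f) == "") <;>
    cases hc : PySem.Set.contains pvFrontendFrameworks (PySem.Str.lower (PySem.Str.strip f)) <;>
    split_ifs <;> simp_all

-- per-element reduction of A's step for the unknown family, through the invariant
set_option maxHeartbeats 1000000 in
theorem pvStepA_unknown (module_name : String) (d : PySem.Dict String (PySem.Set String))
    (ev1 cl : PySem.Set String) (out_ : List String) (f : String)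
    (h1 : (d.getD (PySem.Str.lower (PySem.Str.strip f)) PySem.Set.empty).isEmpty = !(PySem.Set.contains ev1 (PySem.Str.lower (PySem.Str.strip f))))
    (h2 : (d.getD (PySem.Str.lower (PySem.Str.strip f)) PySem.Set.empty).any (fun p => PySem.Str.isIn "/" p && pvPathIsClose module_name p) = PySem.Set.contains cl (PySem.Str.lower (PySem.Str.strip f))) :
    pvStepA "unknown" module_name d out_ f =
      if !(PySem.Str.lower (PySem.Str.strip f) == "") &&
         (!(PySem.Set.contains ev1 (PySem.Str.lower (PySem.Str.strip f))) ||
          PySem.Set.contains cl (PySem.Str.lower (PySem.Str.strip f))) then out_ ++ [f] else out_ := by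
  unfold pvStepA
  simp only [List.any_filter]
  cases he : (PySem.Str.lower (PySem.Str.strip f) == "") <;>
    cases hev : PySem.Set.contains ev1 (PySem.Str.lower (PySem.Str.strip f)) <;>
    cases hcl : PySem.Set.contains cl (PySem.Str.lower (PySem.Str.strip f)) <;>
    split_ifs <;> simp_all

-- ===== VERDICT (by name: the statement is the Claim_ definition above) =====
set_option maxHeartbeats 1000000 in
theorem scoped_frameworks_for_module_py_spec : Claim_equal_scoped_frameworks_for_module_py := by
  intro module_name language detected_frameworks framework_evidence _
  unfold Spec_scoped_frameworks_for_module_py scoped_frameworks_for_module_py scoped_frameworks_for_module_py_alt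
  rcases pvAllowed_cases module_name language with ⟨hf, ha⟩ | ⟨hf | hf, ha⟩ | ⟨hf, ha⟩ <;>
    simp only [hf, ha]
  · rw [PySem.List.foldl_congr_mem detected_frameworks _ _ []
        (fun acc x _ => pvStepA_backend module_name (pvFrameworkScopeMap framework_evidence) acc x),
      PySem.List.foldl_append_if_eq_filter]
    simp
  · rw [PySem.List.foldl_congr_mem detected_frameworks _ _ []
        (fun acc x _ => pvStepA_frontend module_name (pvFrameworkScopeMap framework_evidence) acc x),
      PySem.List.foldl_append_if_eq_filter]
    simp
  · rw [PySem.List.foldl_congr_mem detected_frameworks _ _ []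
        (fun acc x _ => pvStepA_electron module_name (pvFrameworkScopeMap framework_evidence) acc x),
      PySem.List.foldl_append_if_eq_filter]
    simp
  · have inv := pvInv_holds module_name framework_evidence
    rw [PySem.List.foldl_congr_mem detected_frameworks _ _ []
        (fun acc x _ => pvStepA_unknown module_name (pvFrameworkScopeMap framework_evidence)
          (pvEvidenceSets module_name framework_evidence).1 (pvEvidenceSets module_name framework_evidence).2 acc x
          (inv (PySem.Str.lower (PySem.Str.strip x))).1 (inv (PySem.Str.lower (PySem.Str.strip x))).2),
      PySem.List.foldl_append_if_eq_filter]
    simp
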